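-- pv_equiv track=rewrite | github.com/Arzuparreta/agent-aquila | backend/app/services/skills_service.py | _first_heading_and_summary
-- ===== SOURCE A (Python) =====
-- def _first_heading_and_summary(body: str, slug: str) -> tuple[str, str]:
--     title = slug
--     summary = ""
--     lines = body.splitlines()
--     in_body = False
--     para: list[str] = []
--     for line in lines:
--         if not in_body:
--             if line.startswith("# "):
--                 title = line[2:].strip() or slug
--                 in_body = True
--             continue
--         if line.strip():
--             para.append(line.strip())
--         elif para:
--             break
--     if para:
--         summary = " ".join(para)
--         if len(summary) > 240:
--             summary = summary[:237].rstrip() + "…"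
--     return title, summary
-- ===== SOURCE B (Python) =====
-- def _first_heading_and_summary(body: str, slug: str) -> tuple[str, str]:
--     lines = body.splitlines()
--     n = len(lines)
--     i = 0
--     while i < n and not lines[i].startswith("# "):
--         i += 1
--     if i == n:
--         return slug, ""
--     title = lines[i][2:].strip() or slug
--     i += 1
--     while i < n and not lines[i].strip():
--         i += 1
--     j = i
--     while j < n and lines[j].strip():
--         j += 1
--     para = [ln.strip() for ln in lines[i:j]]
--     if not para:
--         return title, ""
--     summary = " ".join(para)
--     if len(summary) > 240:
--         summary = summary[:237].rstrip() + "…"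
--     return title, summary
-- ===== Notes on version B (the rewrite author's own statement) =====
-- stated objective: alternative
-- what changed: Replaces A's single stateful scan (in_body flag, break-driven accumulator) by three separate index scans: find the first '# ' heading, skip blank lines, take the following non-blank block, then slice and strip it; same summary truncation.
import Mathlib
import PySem

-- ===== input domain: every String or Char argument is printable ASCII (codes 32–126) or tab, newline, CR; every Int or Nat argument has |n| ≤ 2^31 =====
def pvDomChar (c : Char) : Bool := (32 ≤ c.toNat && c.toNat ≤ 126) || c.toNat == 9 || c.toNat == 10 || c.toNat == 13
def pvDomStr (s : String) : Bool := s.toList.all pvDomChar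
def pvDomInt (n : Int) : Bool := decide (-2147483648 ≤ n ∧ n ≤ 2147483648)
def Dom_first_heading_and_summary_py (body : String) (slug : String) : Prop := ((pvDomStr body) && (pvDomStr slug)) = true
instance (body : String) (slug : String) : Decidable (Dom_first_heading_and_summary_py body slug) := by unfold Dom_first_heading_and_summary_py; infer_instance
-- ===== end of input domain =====

-- B replaces A's single stateful scan (in_body flag, break-driven accumulator) by three
-- separate scans (find heading / skip blanks / take the non-blank block); same result (objective: alternative).

-- ===== PORT A =====
-- A's for-loop with `in_body`, `para` and `break`, as structural recursion over the lines.
def aLoop (slug : String) : List String → String → Bool → List String → String × List String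
  | [], title, _, para => (title, para)
  | line :: rest, title, inBody, para =>
    if !inBody then
      if PySem.Str.startswith line "# " then
        let t := PySem.Str.strip (PySem.Str.slice line (some 2) none)
        aLoop slug rest (if t = "" then slug else t) true para
      else aLoop slug rest title inBody para
    else
      if PySem.Str.strip line ≠ "" then
        aLoop slug rest title inBody (para ++ [PySem.Str.strip line])
      else if para ≠ [] then (title, para)
      else aLoop slug rest title inBody para

-- `if para: summary = " ".join(para); 240-truncation`
def aFinish (para : List String) : String :=
  if para ≠ [] then
    let s := PySem.Str.join " " para
    if PySem.Str.len s > 240 then PySem.Str.rstrip (PySem.Str.slice s none (some 237)) ++ "…" else s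
  else ""

def first_heading_and_summary_py (body : String) (slug : String) : String × String :=
  let p := aLoop slug (PySem.Str.splitlines body) slug false []
  (p.1, aFinish p.2)

-- ===== PORT B =====
-- first while loop: advance past lines not starting with "# " (suffix form of the index scan)
def bFind : List String → Option (String × List String)
  | [] => none
  | line :: rest => if PySem.Str.startswith line "# " then some (line, rest) else bFind rest

-- second while loop: skip blank lines
def bSkipBlank : List String → List String
  | [] => []
  | line :: rest => if PySem.Str.strip line = "" then bSkipBlank rest else line :: rest

-- third while loop: take the non-blank block lines[i:j]
def bTakePara : List String → List String
  | [] => []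
  | line :: rest => if PySem.Str.strip line ≠ "" then line :: bTakePara rest else []

-- summary join + 240-truncation (identical code in both Pythons)
def bSummary (para : List String) : String :=
  if para ≠ [] then
    let s := PySem.Str.join " " para
    if PySem.Str.len s > 240 then PySem.Str.rstrip (PySem.Str.slice s none (some 237)) ++ "…" else s
  else ""

def first_heading_and_summary_py_alt (body : String) (slug : String) : String × String :=
  match bFind (PySem.Str.splitlines body) with
  | none => (slug, "")
  | some (line, rest) =>
    let t := PySem.Str.strip (PySem.Str.slice line (some 2) none)
    let title := if t = "" then slug else t
    let para := (bTakePara (bSkipBlank rest)).map PySem.Str.strip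
    (title, bSummary para)

-- ===== PRECONDITION & SPEC =====
def Spec_first_heading_and_summary_py (body : String) (slug : String) (out : String × String) : Prop := out = first_heading_and_summary_py_alt body slug
instance (body : String) (slug : String) (out : String × String) : Decidable (Spec_first_heading_and_summary_py body slug out) := by unfold Spec_first_heading_and_summary_py; infer_instance

-- ===== CLAIM (what is proved, stated in full; the proofs are below) =====
def Claim_equal_first_heading_and_summary_py : Prop := ∀ (body : String) (slug : String), Dom_first_heading_and_summary_py body slug → Spec_first_heading_and_summary_py body slug (first_heading_and_summary_py body slug)

-- ===== LEMMAS AND PROOFS =====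

-- Phase 2 with a nonempty accumulator: collect the remaining non-blank block, break at a blank.
theorem aLoop_inBody_ne (slug : String) (rest : List String) (title : String)
    (para : List String) (h : para ≠ []) :
    aLoop slug rest title true para = (title, para ++ (bTakePara rest).map PySem.Str.strip) := by
  induction rest generalizing para with
  | nil => simp [aLoop, bTakePara]
  | cons line rest ih =>
    by_cases hb : PySem.Str.strip line = ""
    · simp [aLoop, bTakePara, hb, h]
    · have step : aLoop slug (line :: rest) title true para
          = aLoop slug rest title true (para ++ [PySem.Str.strip line]) := by
        simp [aLoop, hb]
      rw [step, ih (para ++ [PySem.Str.strip line]) (by simp)]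
      simp [bTakePara, hb]

-- Phase 2 from an empty accumulator: skip blanks, then collect the block.
theorem aLoop_inBody_nil (slug : String) (rest : List String) (title : String) :
    aLoop slug rest title true [] = (title, (bTakePara (bSkipBlank rest)).map PySem.Str.strip) := by
  induction rest with
  | nil => simp [aLoop, bSkipBlank, bTakePara]
  | cons line rest ih =>
    by_cases hb : PySem.Str.strip line = ""
    · simpa [aLoop, bSkipBlank, hb] using ih
    · have step : aLoop slug (line :: rest) title true []
          = aLoop slug rest title true [PySem.Str.strip line] := by
        simp [aLoop, hb]
      rw [step, aLoop_inBody_ne slug rest title [PySem.Str.strip line] (by simp)]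
      simp [bSkipBlank, bTakePara, hb]

-- Phase 1: scanning for the heading is bFind.
theorem aLoop_search (slug : String) (lines : List String) (title : String) :
    aLoop slug lines title false [] =
      match bFind lines with
      | none => (title, [])
      | some (line, rest) =>
        (let t := PySem.Str.strip (PySem.Str.slice line (some 2) none)
         ((if t = "" then slug else t), (bTakePara (bSkipBlank rest)).map PySem.Str.strip)) := by
  induction lines generalizing title with
  | nil => simp [aLoop, bFind]
  | cons line rest ih =>
    by_cases hs : PySem.Str.startswith line "# " = true
    · simp only [aLoop, bFind, hs, Bool.not_false, if_true]
      rw [aLoop_inBody_nil]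
    · have hs' : PySem.Str.startswith line "# " = false := by simpa using hs
      simp only [aLoop, bFind, hs', Bool.not_false, Bool.false_eq_true, if_false, if_true]
      exact ih title

-- ===== VERDICT (by name: the statement is the Claim_ definition above) =====
theorem first_heading_and_summary_py_spec : Claim_equal_first_heading_and_summary_py := by
  intro body slug _
  show first_heading_and_summary_py body slug = first_heading_and_summary_py_alt body slug
  unfold first_heading_and_summary_py first_heading_and_summary_py_alt
  rw [aLoop_search]
  cases h : bFind (PySem.Str.splitlines body) with
  | none => simp [aFinish]
  | some p => cases p with
    | mk line rest => simp [aFinish, bSummary]
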